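-- pv_equiv track=rewrite | github.com/Paul-UK/job_hunter_agent | apps/api/app/services/job_discovery/service.py | _extract_explicit_location_text
-- ===== SOURCE A (Python) =====
-- def _extract_explicit_location_text(text: str) -> str | None:
--     lines = [" ".join(line.strip().split()) for line in text.splitlines() if line.strip()]
--     for index, line in enumerate(lines):
--         lowered = line.casefold()
--         if lowered.startswith("location:") or lowered.startswith("locations:"):
--             _, _, remainder = line.partition(":")
--             candidate = remainder.strip(" -")
--             if candidate:
--                 return candidate
--             if index + 1 < len(lines):
--                 next_line = lines[index + 1].strip(" -")
--                 if next_line: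
--                     return next_line
--     return None
-- ===== SOURCE B (Python) =====
-- def _extract_explicit_location_text(text: str) -> str | None:
--     lines = [" ".join(line.strip().split()) for line in text.splitlines() if line.strip()]
--     expecting = False
--     for line in lines:
--         if expecting and line.strip(" -"):
--             return line.strip(" -")
--         low = line.casefold()
--         if low.startswith("location:") or low.startswith("locations:"):
--             candidate = line.partition(":")[2].strip(" -")
--             if candidate:
--                 return candidate
--             expecting = True
--         else:
--             expecting = False
--     return None
-- ===== Notes on version B (the rewrite author's own statement) =====
-- stated objective: alternative
-- what changed: Replaces the indexed scan with lines[index+1] lookahead by a single sequential scan carrying a boolean flag that consumes the line following a bare location header.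
import Mathlib
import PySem

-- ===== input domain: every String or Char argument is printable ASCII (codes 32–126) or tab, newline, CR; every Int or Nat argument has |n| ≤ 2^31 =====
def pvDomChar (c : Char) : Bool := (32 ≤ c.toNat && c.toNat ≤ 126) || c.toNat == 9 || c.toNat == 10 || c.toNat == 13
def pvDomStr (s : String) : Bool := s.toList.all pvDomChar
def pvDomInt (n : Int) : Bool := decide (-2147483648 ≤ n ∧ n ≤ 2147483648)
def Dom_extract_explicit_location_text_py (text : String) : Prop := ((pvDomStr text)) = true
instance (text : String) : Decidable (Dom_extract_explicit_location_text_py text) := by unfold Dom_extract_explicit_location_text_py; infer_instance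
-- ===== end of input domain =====

-- B replaces A's indexed lookahead (lines[index+1]) by a sequential scan with an 'expecting_value' flag; same normalization, same return values (objective: alternative decomposition).
-- casefold is ported as PySem.Str.lower: they coincide on the ASCII domain above.

-- ===== PORT A =====
-- shared helper: the normalization comprehension (identical line in both Pythons)
def pvNormLines (text : String) : List String :=
  ((PySem.Str.splitlines text).filter (fun l => decide (PySem.Str.strip l ≠ ""))).map
    (fun l => PySem.Str.join " " (PySem.Str.split₀ (PySem.Str.strip l)))

-- hand port of line.partition(":") taking only the remainder: split at the FIRST ':' (exact: partition splits at the first occurrence; remainder "" when absent)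
def pvPartitionRem (line : String) : String :=
  let i := PySem.Str.find line ":"
  if i < 0 then "" else PySem.Str.slice line (some (i + 1)) none

def pvLoopA : List String → Option String
  | [] => none
  | line :: rest =>
    if PySem.Str.startswith (PySem.Str.lower line) "location:"
        || PySem.Str.startswith (PySem.Str.lower line) "locations:" then
      let candidate := PySem.Str.stripChars (pvPartitionRem line) " -"
      if candidate ≠ "" then some candidate
      else
        match rest with
        | [] => pvLoopA rest
        | next :: _ =>
          let next_line := PySem.Str.stripChars next " -"
          if next_line ≠ "" then some next_line else pvLoopA rest
    else pvLoopA rest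

def extract_explicit_location_text_py (text : String) : Option String :=
  pvLoopA (pvNormLines text)

-- ===== PORT B =====
def pvLoopB : Bool → List String → Option String
  | _, [] => none
  | expecting, line :: rest =>
    if expecting && decide (PySem.Str.stripChars line " -" ≠ "") then
      some (PySem.Str.stripChars line " -")
    else if PySem.Str.startswith (PySem.Str.lower line) "location:"
        || PySem.Str.startswith (PySem.Str.lower line) "locations:" then
      let candidate := PySem.Str.stripChars (pvPartitionRem line) " -"
      if candidate ≠ "" then some candidate else pvLoopB true rest
    else pvLoopB false rest

def extract_explicit_location_text_py_alt (text : String) : Option String :=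
  pvLoopB false (pvNormLines text)

-- ===== PRECONDITION & SPEC =====
def Spec_extract_explicit_location_text_py (text : String) (out : Option String) : Prop := out = extract_explicit_location_text_py_alt text
instance (text : String) (out : Option String) : Decidable (Spec_extract_explicit_location_text_py text out) := by unfold Spec_extract_explicit_location_text_py; infer_instance

-- ===== CLAIM (what is proved, stated in full; the proofs are below) =====
def Claim_equal_extract_explicit_location_text_py : Prop := ∀ (text : String), Dom_extract_explicit_location_text_py text → Spec_extract_explicit_location_text_py text (extract_explicit_location_text_py text)

-- ===== LEMMAS AND PROOFS =====

-- The flag-based scan agrees with the indexed-lookahead scan: with the flag clear it is A's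
-- loop; with the flag set it first offers the head line (stripped of ' -') and otherwise
-- proceeds exactly as A's loop does after a failed lookahead.
theorem pvLoopB_eq_pvLoopA (lines : List String) :
    pvLoopB false lines = pvLoopA lines ∧
    pvLoopB true lines =
      (match lines with
        | [] => none
        | line :: _ =>
          if PySem.Str.stripChars line " -" ≠ "" then some (PySem.Str.stripChars line " -")
          else pvLoopA lines) := by
  induction lines with
  | nil => constructor <;> rfl
  | cons line rest ih =>
    have h1 : pvLoopB false (line :: rest) = pvLoopA (line :: rest) := by
      simp only [pvLoopB, pvLoopA, Bool.false_and]
      rw [if_neg Bool.false_ne_true]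
      split_ifs with hhdr hc
      · rfl
      · rw [ih.2]
        cases rest with
        | nil => simp [pvLoopA]
        | cons next tl => rfl
      · exact ih.1
    refine ⟨h1, ?_⟩
    show pvLoopB true (line :: rest) =
      if PySem.Str.stripChars line " -" ≠ "" then some (PySem.Str.stripChars line " -")
      else pvLoopA (line :: rest)
    by_cases hv : PySem.Str.stripChars line " -" ≠ ""
    · simp only [pvLoopB, Bool.true_and]
      rw [if_pos (decide_eq_true hv), if_pos hv]
    · rw [if_neg hv, ← h1]
      simp only [pvLoopB, Bool.true_and, Bool.false_and]
      rw [if_neg Bool.false_ne_true, if_neg (by simp [hv])]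

-- ===== VERDICT (by name: the statement is the Claim_ definition above) =====
theorem extract_explicit_location_text_py_spec : Claim_equal_extract_explicit_location_text_py := by
  intro text _
  unfold Spec_extract_explicit_location_text_py extract_explicit_location_text_py extract_explicit_location_text_py_alt
  exact (pvLoopB_eq_pvLoopA (pvNormLines text)).1.symm
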